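-- pv_equiv track=rewrite | github.com/saikartheekb/AdventOfCode | AOC2024/Day9/main.py | find_file_id_loc_details
-- ===== SOURCE A (Python) =====
-- def find_file_id_loc_details(file_id, disk_map3):
--     i = len(disk_map3)-1
--     x = -1
--     y = -1
--     while i >= 0:
--         if disk_map3[i] == file_id:
--             y = i
--             while i < len(disk_map3) and disk_map3[i] == file_id:
--                 i -= 1
--             x = i+1
--             break
--         i -= 1
--     return [x,y]
-- ===== SOURCE B (Python) =====
-- def find_file_id_loc_details(file_id, disk_map3):
--     x = -1
--     y = -1
--     prev_match = False
--     for i, v in enumerate(disk_map3):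
--         if v == file_id:
--             y = i
--             if not prev_match:
--                 x = i
--             prev_match = True
--         else:
--             prev_match = False
--     return [x, y]
-- ===== Notes on version B (the rewrite author's own statement) =====
-- stated objective: alternative
-- what changed: Replaces A's backward scan with a nested walk-back inner loop by a single forward pass that tracks the start and end of the most recent run of file_id.
-- crash fix: On nonempty lists whose elements all equal file_id, A's inner loop wraps around via negative indexing and raises IndexError; B returns [0, len-1]. — e.g. on find_file_id_loc_details(5, [5, 5]): A raises IndexError, B returns [0, 1]
import Mathlib
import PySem

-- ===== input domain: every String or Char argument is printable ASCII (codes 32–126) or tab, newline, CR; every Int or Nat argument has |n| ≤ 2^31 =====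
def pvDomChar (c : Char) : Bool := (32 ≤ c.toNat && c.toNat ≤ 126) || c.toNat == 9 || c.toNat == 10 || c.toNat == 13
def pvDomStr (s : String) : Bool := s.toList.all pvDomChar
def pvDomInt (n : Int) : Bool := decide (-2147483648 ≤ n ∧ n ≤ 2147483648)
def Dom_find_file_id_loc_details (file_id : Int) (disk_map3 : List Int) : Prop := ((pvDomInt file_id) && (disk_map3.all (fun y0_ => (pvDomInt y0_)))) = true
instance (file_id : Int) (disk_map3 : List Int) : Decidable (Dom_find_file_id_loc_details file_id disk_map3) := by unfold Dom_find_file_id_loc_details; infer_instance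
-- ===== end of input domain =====

-- B replaces A's backward scan (with its inner walk-back loop) by a single forward pass
-- tracking the start/end of the most recent run of file_id; same O(n) cost, different decomposition.

-- ===== PORT A =====
-- inner while loop: 'while i < len(disk_map3) and disk_map3[i] == file_id: i -= 1'
-- (fuel makes it total; on inputs in Pre_ the fuel is never exhausted)
def pvInnerA (file_id : Int) (disk_map3 : List Int) : Int → Nat → Int
  | i, 0 => i
  | i, f + 1 =>
    if i < (disk_map3.length : Int) ∧ PySem.List.pyGet? disk_map3 i = some file_id
    then pvInnerA file_id disk_map3 (i - 1) f
    else i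

-- outer while loop: i counts down from len-1; k = i+1
def pvOuterA (file_id : Int) (disk_map3 : List Int) : Nat → List Int
  | 0 => [-1, -1]
  | k + 1 =>
    if PySem.List.pyGet? disk_map3 (k : Int) = some file_id then
      [pvInnerA file_id disk_map3 (k : Int) (disk_map3.length + 2) + 1, (k : Int)]
    else pvOuterA file_id disk_map3 k

def find_file_id_loc_details (file_id : Int) (disk_map3 : List Int) : List Int :=
  pvOuterA file_id disk_map3 disk_map3.length

-- ===== PORT B =====
def pvStepB (file_id : Int) (st : Int × Int × Bool) (p : Int × Int) : Int × Int × Bool :=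
  if p.2 = file_id then ((if st.2.2 then st.1 else p.1), p.1, true)
  else (st.1, st.2.1, false)

def find_file_id_loc_details_alt (file_id : Int) (disk_map3 : List Int) : List Int :=
  let s := (PySem.List.enumerate disk_map3 0).foldl (pvStepB file_id) (-1, -1, false)
  [s.1, s.2.1]

-- ===== PRECONDITION & SPEC =====
-- Pre_ excludes exactly the nonempty lists whose elements all equal file_id: there A's inner
-- loop wraps around via negative indexing and raises IndexError (A returns on everything else).
def Pre_find_file_id_loc_details (file_id : Int) (disk_map3 : List Int) : Prop :=
  disk_map3 = [] ∨ ∃ v ∈ disk_map3, v ≠ file_id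
instance (file_id : Int) (disk_map3 : List Int) : Decidable (Pre_find_file_id_loc_details file_id disk_map3) := by unfold Pre_find_file_id_loc_details; infer_instance

def pvWitness_find_file_id_loc_details : Int × List Int := (5, [5, 0, 5])

-- On nonempty lists whose elements all equal file_id, A raises IndexError (negative-index wraparound); B returns [0, len-1].
def Raises_find_file_id_loc_details (file_id : Int) (disk_map3 : List Int) : Prop :=
  disk_map3 ≠ [] ∧ ∀ v ∈ disk_map3, v = file_id
instance (file_id : Int) (disk_map3 : List Int) : Decidable (Raises_find_file_id_loc_details file_id disk_map3) := by unfold Raises_find_file_id_loc_details; infer_instance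

def pvRaiseWitness_find_file_id_loc_details : Int × List Int := (5, [5, 5])
def pvRaiseWitnessOut_find_file_id_loc_details : List Int := [0, 1]

def Spec_find_file_id_loc_details (file_id : Int) (disk_map3 : List Int) (out : List Int) : Prop := out = find_file_id_loc_details_alt file_id disk_map3
instance (file_id : Int) (disk_map3 : List Int) (out : List Int) : Decidable (Spec_find_file_id_loc_details file_id disk_map3 out) := by unfold Spec_find_file_id_loc_details; infer_instance

-- ===== CLAIM (what is proved, stated in full; the proofs are below) =====
def Claim_equal_find_file_id_loc_details : Prop := ∀ (file_id : Int) (disk_map3 : List Int), Dom_find_file_id_loc_details file_id disk_map3 → Pre_find_file_id_loc_details file_id disk_map3 → Spec_find_file_id_loc_details file_id disk_map3 (find_file_id_loc_details file_id disk_map3)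

def Claim_raises_find_file_id_loc_details : Prop := (∀ (file_id : Int) (disk_map3 : List Int), Dom_find_file_id_loc_details file_id disk_map3 → Raises_find_file_id_loc_details file_id disk_map3 → ¬ Pre_find_file_id_loc_details file_id disk_map3) ∧ (Dom_find_file_id_loc_details (pvRaiseWitness_find_file_id_loc_details.1) (pvRaiseWitness_find_file_id_loc_details.2) ∧ Raises_find_file_id_loc_details (pvRaiseWitness_find_file_id_loc_details.1) (pvRaiseWitness_find_file_id_loc_details.2) ∧ find_file_id_loc_details_alt (pvRaiseWitness_find_file_id_loc_details.1) (pvRaiseWitness_find_file_id_loc_details.2) = pvRaiseWitnessOut_find_file_id_loc_details)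

-- ===== LEMMAS AND PROOFS =====

-- A's outer scan finds nothing below k
lemma pvOuterA_no_match (fid : Int) (dm : List Int) :
    ∀ k : Nat, (∀ i : Nat, i < k → dm[i]? ≠ some fid) → pvOuterA fid dm k = [-1, -1] := by
  intro k
  induction k with
  | zero => intro _; rfl
  | succ k ih =>
    intro h
    simp only [pvOuterA, PySem.List.pyGet?_natCast]
    rw [if_neg (h k (Nat.lt_succ_self k))]
    exact ih (fun i hi => h i (Nat.lt_succ_of_lt hi))

-- A's outer scan stops at the rightmost match
lemma pvOuterA_match (fid : Int) (dm : List Int) (y : Nat) (hy : dm[y]? = some fid) :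
    ∀ k : Nat, y < k → (∀ i : Nat, y < i → i < k → dm[i]? ≠ some fid) →
    pvOuterA fid dm k = [pvInnerA fid dm (y : Int) (dm.length + 2) + 1, (y : Int)] := by
  intro k
  induction k with
  | zero => omega
  | succ k ih =>
    intro hyk hmax
    simp only [pvOuterA, PySem.List.pyGet?_natCast]
    by_cases hky : y = k
    · subst hky; rw [if_pos hy]
    · have hne : dm[k]? ≠ some fid := hmax k (by omega) (Nat.lt_succ_self k)
      rw [if_neg hne]
      exact ih (by omega) (fun i h1 h2 => hmax i h1 (Nat.lt_succ_of_lt h2))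

-- A's inner loop walks back over a run [j, y] of file_id and stops at j-1
lemma pvInnerA_run (fid : Int) (dm : List Int) :
    ∀ (f : Nat) (y j : Nat), j ≤ y → y < dm.length →
    (∀ i : Nat, j ≤ i → i ≤ y → dm[i]? = some fid) →
    (if j = 0 then PySem.List.pyGet? dm (-1) ≠ some fid else dm[j - 1]? ≠ some fid) →
    y - j + 2 ≤ f →
    pvInnerA fid dm (y : Int) f = (j : Int) - 1 := by
  intro f
  induction f with
  | zero => omega
  | succ f ih =>
    intro y j hjy hyn hrun hstop hf
    have hget : PySem.List.pyGet? dm (y : Int) = some fid := by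
      rw [PySem.List.pyGet?_natCast]; exact hrun y hjy le_rfl
    simp only [pvInnerA]
    rw [if_pos ⟨by exact_mod_cast hyn, hget⟩]
    obtain ⟨f', rfl⟩ : ∃ f', f = f' + 1 := ⟨f - 1, by omega⟩
    by_cases hcase : j = y
    · subst hcase
      by_cases hj0 : j = 0
      · subst hj0
        have hstop' : PySem.List.pyGet? dm (-1) ≠ some fid := by simpa using hstop
        simp only [pvInnerA, Nat.cast_zero, zero_sub]
        rw [if_neg (fun h => hstop' h.2)]
      · have hstop' : dm[j - 1]? ≠ some fid := by simpa [hj0] using hstop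
        have hcast : (j : Int) - 1 = ((j - 1 : Nat) : Int) := by omega
        rw [hcast]
        simp only [pvInnerA, PySem.List.pyGet?_natCast]
        rw [if_neg (fun h => hstop' h.2)]
    · -- j < y: recurse with y - 1
      have hy1 : (y : Int) - 1 = ((y - 1 : Nat) : Int) := by omega
      rw [hy1]
      exact ih (y - 1) j (by omega) (by omega)
        (fun i h1 h2 => hrun i h1 (by omega)) hstop (by omega)

-- B's fold state, characterized by reverse induction on the list
lemma pvStateB_char (fid : Int) (dm : List Int) :
    (let s := (PySem.List.enumerate dm 0).foldl (pvStepB fid) (-1, -1, false);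
     ((∀ i : Nat, i < dm.length → dm[i]? ≠ some fid) ∧ s = (-1, -1, false)) ∨
     (∃ j y : Nat, j ≤ y ∧ y < dm.length ∧
       (∀ i : Nat, j ≤ i → i ≤ y → dm[i]? = some fid) ∧
       (∀ i : Nat, y < i → i < dm.length → dm[i]? ≠ some fid) ∧
       (j = 0 ∨ dm[j - 1]? ≠ some fid) ∧
       s = ((j : Int), (y : Int), decide (y + 1 = dm.length)))) := by
  induction dm using List.reverseRecOn with
  | nil => left; exact ⟨by simp, rfl⟩
  | append_singleton xs v ih =>
    simp only [PySem.List.enumerate_append, PySem.List.enumerate_cons,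
      PySem.List.enumerate_nil, List.foldl_append, List.foldl_cons, List.foldl_nil] at *
    set s := (PySem.List.enumerate xs 0).foldl (pvStepB fid) (-1, -1, false) with hs
    have hlen : (xs ++ [v]).length = xs.length + 1 := by simp
    have hidx : ∀ i : Nat, i < xs.length → (xs ++ [v])[i]? = xs[i]? := by
      intro i hi; rw [List.getElem?_append_left hi]
    have hlast : (xs ++ [v])[xs.length]? = some v := by
      simp
    by_cases hv : v = fid
    · right
      rcases ih with ⟨hno, hseq⟩ | ⟨j, y, hjy, hyn, hrun, hmax, hbnd, hseq⟩
      · refine ⟨xs.length, xs.length, le_rfl, by omega, ?_, ?_, ?_, ?_⟩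
        · intro i h1 h2
          have : i = xs.length := by omega
          subst this; rw [hlast, hv]
        · intro i h1 h2; omega
        · rcases Nat.eq_zero_or_pos xs.length with h0 | h0
          · left; exact h0
          · right; rw [hidx _ (by omega)]; exact hno _ (by omega)
        · rw [hseq]
          simp [pvStepB, hv]
      · by_cases hprev : y + 1 = xs.length
        · -- run extends
          refine ⟨j, xs.length, by omega, by omega, ?_, ?_, ?_, ?_⟩
          · intro i h1 h2
            rcases Nat.lt_or_ge i xs.length with h | h
            · rw [hidx _ h]; exact hrun i h1 (by omega)
            · have : i = xs.length := by omega
              subst this; rw [hlast, hv]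
          · intro i h1 h2; omega
          · rcases hbnd with h | h
            · left; exact h
            · right; rw [hidx _ (by omega)]; exact h
          · rw [hseq]
            simp [pvStepB, hv, hprev]
        · -- new run of length 1 at the end
          refine ⟨xs.length, xs.length, le_rfl, by omega, ?_, ?_, ?_, ?_⟩
          · intro i h1 h2
            have : i = xs.length := by omega
            subst this; rw [hlast, hv]
          · intro i h1 h2; omega
          · right
            rw [hidx _ (by omega)]
            exact hmax _ (by omega) (by omega)
          · rw [hseq]
            have : decide (y + 1 = xs.length) = false := by simp [hprev]
            simp [pvStepB, hv, this]
    · -- v ≠ fid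
      rcases ih with ⟨hno, hseq⟩ | ⟨j, y, hjy, hyn, hrun, hmax, hbnd, hseq⟩
      · left
        refine ⟨?_, ?_⟩
        · intro i hi
          rcases Nat.lt_or_ge i xs.length with h | h
          · rw [hidx _ h]; exact hno i h
          · have : i = xs.length := by rw [hlen] at hi; omega
            subst this; rw [hlast]; simp [hv]
        · rw [hseq]; simp [pvStepB, hv]
      · right
        refine ⟨j, y, hjy, by omega, ?_, ?_, ?_, ?_⟩
        · intro i h1 h2; rw [hidx _ (by omega)]; exact hrun i h1 h2
        · intro i h1 h2
          rcases Nat.lt_or_ge i xs.length with h | h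
          · rw [hidx _ h]; exact hmax i h1 h
          · have : i = xs.length := by rw [hlen] at h2; omega
            subst this; rw [hlast]; simp [hv]
        · rcases hbnd with h | h
          · left; exact h
          · right; rw [hidx _ (by omega)]; exact h
        · rw [hseq]
          simp [pvStepB, hv]
          omega

-- ===== VERDICT (by name: the statement is the Claim_ definition above) =====
theorem find_file_id_loc_details_spec : Claim_equal_find_file_id_loc_details := by
  intro fid dm _ hpre
  unfold Spec_find_file_id_loc_details
  unfold find_file_id_loc_details find_file_id_loc_details_alt
  rcases pvStateB_char fid dm with ⟨hno, hseq⟩ | ⟨j, y, hjy, hyn, hrun, hmax, hbnd, hseq⟩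
  · simp only [hseq]
    rw [pvOuterA_no_match fid dm dm.length hno]
  · simp only [hseq]
    rw [pvOuterA_match fid dm y (hrun y hjy le_rfl) dm.length hyn
      (fun i h1 h2 => hmax i h1 h2)]
    have hstop : if j = 0 then PySem.List.pyGet? dm (-1) ≠ some fid else dm[j - 1]? ≠ some fid := by
      by_cases hj0 : j = 0
      · subst hj0
        rw [if_pos rfl, PySem.List.pyGet?_neg_one]
        -- if also the last element matched, the whole list would equal fid, contradicting Pre_
        by_cases hylast : y = dm.length - 1
        · -- run covers everything: contradiction with hpre
          exfalso
          have hall : ∀ v ∈ dm, v = fid := by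
            intro w hw
            obtain ⟨i, hi, hwi⟩ := List.getElem_of_mem hw
            have : dm[i]? = some fid := hrun i (by omega) (by omega)
            rw [List.getElem?_eq_getElem hi] at this
            simp at this
            rw [← hwi]; exact this
          rcases hpre with h | ⟨w, hw, hne⟩
          · subst h; simp at hyn
          · exact hne (hall w hw)
        · have hne : dm[dm.length - 1]? ≠ some fid := hmax _ (by omega) (by omega)
          rw [List.getLast?_eq_getElem?]
          exact hne
      · rw [if_neg hj0]
        rcases hbnd with h | h
        · exact absurd h hj0
        · exact h
    rw [pvInnerA_run fid dm (dm.length + 2) y j hjy hyn hrun hstop (by omega)]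
    norm_num

@[simp] theorem find_file_id_loc_details_raises : Claim_raises_find_file_id_loc_details := by
  unfold Claim_raises_find_file_id_loc_details
  refine ⟨?_, by decide⟩
  intro fid dm _ ⟨hne, hall⟩ hpre
  rcases hpre with h | ⟨w, hw, hwne⟩
  · exact hne h
  · exact hwne (hall w hw)
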